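-- pv_equiv track=rewrite | github.com/hcgasser/CAPE_Beam | libs/CAPE/MPNN/data/aux.py | S_to_seqs
-- ===== SOURCE A (Python) =====
-- def S_to_seqs(S, chain_encoding_all):
--     """Converts a tensor of indices to a list of sequences.
--
--     :param S: tensor of indices
--     :return: list of sequences
--     """
--
--     seqs = []
--     alphabet = 'ACDEFGHIKLMNPQRSTVWYX'
--
--     for s, ce in zip(S, chain_encoding_all):
--         c_prev = int(ce[0])
--         seq = []
--         for a, c in zip(s, ce):
--             if int(c) == 0:
--                 break
--             if int(c) != c_prev:
--                 seq.append('/')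
--                 c_prev = int(c)
--             seq.append(alphabet[int(a)])
--         seqs.append("".join(seq))
--     return seqs
-- ===== SOURCE B (Python) =====
-- def S_to_seqs(S, chain_encoding_all):
--     """Converts a tensor of indices to a list of sequences (segment-first decomposition)."""
--     alphabet = 'ACDEFGHIKLMNPQRSTVWYX'
--     seqs = []
--     for s, ce in zip(S, chain_encoding_all):
--         # valid prefix: pairs before the first zero chain id
--         pairs = []
--         for a, c in zip(s, ce):
--             if int(c) == 0:
--                 break
--             pairs.append((int(a), int(c)))
--         # split the prefix into maximal runs of equal chain id, build one string per run
--         chunks = []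
--         i = 0
--         while i < len(pairs):
--             j = i
--             while j < len(pairs) and pairs[j][1] == pairs[i][1]:
--                 j += 1
--             chunks.append("".join(alphabet[a] for a, _ in pairs[i:j]))
--             i = j
--         seqs.append("/".join(chunks))
--     return seqs
-- ===== Notes on version B (the rewrite author's own statement) =====
-- stated objective: idiomatic
-- what changed: B replaces A's interleaved c_prev state-tracking loop (emitting '/' inline on every chain change) by a segment-first decomposition: truncate the valid prefix at the first zero chain id, split it into maximal runs of equal chain id, render each run to a string and '/'.join the chunks.
import Mathlib
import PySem

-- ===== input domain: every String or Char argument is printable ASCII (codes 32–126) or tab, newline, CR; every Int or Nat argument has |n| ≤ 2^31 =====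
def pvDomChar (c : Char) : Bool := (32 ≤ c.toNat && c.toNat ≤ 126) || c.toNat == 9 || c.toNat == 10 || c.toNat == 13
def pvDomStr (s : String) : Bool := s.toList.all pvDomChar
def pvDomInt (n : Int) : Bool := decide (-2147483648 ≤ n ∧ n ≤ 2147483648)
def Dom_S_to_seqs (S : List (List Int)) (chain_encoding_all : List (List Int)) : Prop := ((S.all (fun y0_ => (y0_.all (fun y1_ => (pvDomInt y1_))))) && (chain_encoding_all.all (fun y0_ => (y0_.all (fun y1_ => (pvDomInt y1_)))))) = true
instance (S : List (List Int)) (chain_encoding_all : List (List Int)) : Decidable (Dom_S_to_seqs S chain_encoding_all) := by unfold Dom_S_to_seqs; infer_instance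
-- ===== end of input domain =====

-- B replaces A's interleaved c_prev state-tracking loop by a segment-first decomposition
-- (truncate at first zero chain id, group maximal equal-chain runs, '/'-join); same cost, more idiomatic.

-- ===== PORT A =====
def pvAlpha : List Char :=
  ['A','C','D','E','F','G','H','I','K','L','M','N','P','Q','R','S','T','V','W','Y','X']

-- alphabet[int(a)]; Pre_ excludes out-of-range indices, so the .getD default is never claimed about
def pvChr (a : Int) : Char := (PySem.List.pyGet? pvAlpha a).getD ' '

-- the inner 'for a, c in zip(s, ce)' loop of A, with its c_prev state and inline '/' emission
def pvInnerA : List (Int × Int) → Int → List Char → List Char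
  | [], _, seq => seq
  | (a, c) :: rest, cPrev, seq =>
    if c = 0 then seq
    else if c ≠ cPrev then pvInnerA rest c (seq ++ ['/', pvChr a])
    else pvInnerA rest cPrev (seq ++ [pvChr a])

def S_to_seqs (S : List (List Int)) (chain_encoding_all : List (List Int)) : List String :=
  (List.zip S chain_encoding_all).foldl (fun seqs p =>
    -- c_prev = int(ce[0]); Pre_ guarantees p.2 ≠ [], so the .getD default is never claimed about
    seqs ++ [String.ofList (pvInnerA (List.zip p.1 p.2) (p.2.head?.getD 0) [])]) []

-- ===== PORT B =====
-- the 'pairs' truncation loop of B: pairs before the first zero chain id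
def pvPrefixB : List (Int × Int) → List (Int × Int)
  | [] => []
  | (a, c) :: rest => if c = 0 then [] else (a, c) :: pvPrefixB rest

-- the while-loop of B: split into maximal runs of equal chain id, one rendered chunk per run
def pvChunksB : List (Int × Int) → List (List Char)
  | [] => []
  | (a, c) :: rest =>
    ((a, c) :: rest.takeWhile (fun q => q.2 == c)).map (fun q => pvChr q.1)
      :: pvChunksB (rest.dropWhile (fun q => q.2 == c))
termination_by ps => ps.length
decreasing_by simp; exact List.length_dropWhile_le _ _

-- "/".join(chunks)
def pvJoinSlash : List (List Char) → List Char
  | [] => []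
  | [x] => x
  | x :: xs => x ++ '/' :: pvJoinSlash xs

def S_to_seqs_alt (S : List (List Int)) (chain_encoding_all : List (List Int)) : List String :=
  (List.zip S chain_encoding_all).foldl (fun seqs p =>
    seqs ++ [String.ofList (pvJoinSlash (pvChunksB (pvPrefixB (List.zip p.1 p.2))))]) []

-- ===== PRECONDITION & SPEC =====
-- Pre_ excludes exactly the inputs where Python A raises: a paired chain-encoding row that is
-- empty (IndexError at ce[0]) or an alphabet index outside -21..20 reached before the first
-- zero chain id (IndexError at alphabet[int(a)]).
def Pre_S_to_seqs (S : List (List Int)) (chain_encoding_all : List (List Int)) : Prop :=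
  ∀ p ∈ List.zip S chain_encoding_all, p.2 ≠ [] ∧
    ∀ q ∈ (List.zip p.1 p.2).takeWhile (fun q => q.2 != 0), -21 ≤ q.1 ∧ q.1 ≤ 20
instance (S : List (List Int)) (chain_encoding_all : List (List Int)) : Decidable (Pre_S_to_seqs S chain_encoding_all) := by unfold Pre_S_to_seqs; infer_instance

def pvWitness_S_to_seqs : List (List Int) × List (List Int) := ([[0, 1, 2], [3]], [[1, 1, 2], [1]])

def Spec_S_to_seqs (S : List (List Int)) (chain_encoding_all : List (List Int)) (out : List String) : Prop := out = S_to_seqs_alt S chain_encoding_all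
instance (S : List (List Int)) (chain_encoding_all : List (List Int)) (out : List String) : Decidable (Spec_S_to_seqs S chain_encoding_all out) := by unfold Spec_S_to_seqs; infer_instance

-- ===== CLAIM (what is proved, stated in full; the proofs are below) =====
def Claim_equal_S_to_seqs : Prop := ∀ (S : List (List Int)) (chain_encoding_all : List (List Int)), Dom_S_to_seqs S chain_encoding_all → Pre_S_to_seqs S chain_encoding_all → Spec_S_to_seqs S chain_encoding_all (S_to_seqs S chain_encoding_all)


-- ===== LEMMAS AND PROOFS =====

theorem pvInnerA_acc (ps : List (Int × Int)) : ∀ c acc,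
    pvInnerA ps c acc = acc ++ pvInnerA ps c [] := by
  induction ps with
  | nil => intro c acc; simp [pvInnerA]
  | cons q rest ih =>
    intro c acc
    obtain ⟨a, cq⟩ := q
    by_cases h0 : cq = 0
    · simp [pvInnerA, h0]
    · by_cases hne : cq ≠ c
      · simp only [pvInnerA, if_neg h0, if_pos hne]
        rw [ih cq (acc ++ ['/', pvChr a]), ih cq ([] ++ ['/', pvChr a])]
        simp
      · simp only [pvInnerA, if_neg h0, if_neg hne]
        rw [ih c (acc ++ [pvChr a]), ih c ([] ++ [pvChr a])]
        simp

theorem pvInnerA_trunc (ps : List (Int × Int)) : ∀ c,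
    pvInnerA ps c [] = pvInnerA (pvPrefixB ps) c [] := by
  induction ps with
  | nil => intro c; rfl
  | cons q rest ih =>
    intro c
    obtain ⟨a, cq⟩ := q
    by_cases h0 : cq = 0
    · simp [pvInnerA, pvPrefixB, h0]
    · simp only [pvPrefixB, if_neg h0]
      by_cases hne : cq ≠ c
      · simp only [pvInnerA, if_neg h0, if_pos hne]
        rw [pvInnerA_acc rest cq ([] ++ ['/', pvChr a]),
            pvInnerA_acc (pvPrefixB rest) cq ([] ++ ['/', pvChr a]), ih cq]
      · simp only [pvInnerA, if_neg h0, if_neg hne]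
        rw [pvInnerA_acc rest c ([] ++ [pvChr a]),
            pvInnerA_acc (pvPrefixB rest) c ([] ++ [pvChr a]), ih c]

theorem pvPrefixB_nonzero (ps : List (Int × Int)) : ∀ q ∈ pvPrefixB ps, q.2 ≠ 0 := by
  induction ps with
  | nil => intro q h; simp [pvPrefixB] at h
  | cons p rest ih =>
    intro q h
    obtain ⟨a, c⟩ := p
    simp only [pvPrefixB] at h
    split_ifs at h with h0
    · simp at h
    · rcases List.mem_cons.mp h with h | h
      · subst h; exact h0
      · exact ih q h

theorem pvInnerA_run (tw : List (Int × Int)) : ∀ rest c, c ≠ 0 → (∀ q ∈ tw, q.2 = c) →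
    pvInnerA (tw ++ rest) c [] = tw.map (fun q => pvChr q.1) ++ pvInnerA rest c [] := by
  induction tw with
  | nil => intro rest c _ _; simp
  | cons q tw ih =>
    intro rest c hc hall
    obtain ⟨a, cq⟩ := q
    have hcq : cq = c := hall (a, cq) (List.mem_cons_self)
    subst hcq
    simp only [List.cons_append, pvInnerA, if_neg hc, if_neg (by simp : ¬ cq ≠ cq)]
    rw [pvInnerA_acc (tw ++ rest) cq ([] ++ [pvChr a]),
        ih rest cq hc (fun q h => hall q (List.mem_cons_of_mem _ h))]
    simp

theorem pvChunksB_nil_iff (ps : List (Int × Int)) : pvChunksB ps = [] ↔ ps = [] := by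
  cases ps with
  | nil => simp [pvChunksB]
  | cons q rest => obtain ⟨a, c⟩ := q; simp [pvChunksB]

theorem pvJoinSlash_cons (x : List Char) (xs : List (List Char)) :
    pvJoinSlash (x :: xs) = x ++ (if xs = [] then [] else '/' :: pvJoinSlash xs) := by
  cases xs with
  | nil => simp [pvJoinSlash]
  | cons y ys => simp [pvJoinSlash]

theorem pvMain (n : Nat) : ∀ ps : List (Int × Int), ps.length ≤ n → (∀ q ∈ ps, q.2 ≠ 0) → ∀ c,
    pvInnerA ps c [] =
      (match ps with | [] => [] | q :: _ => if q.2 = c then [] else ['/'])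
        ++ pvJoinSlash (pvChunksB ps) := by
  induction n with
  | zero =>
    intro ps hlen _ c
    have h : ps = [] := List.length_eq_zero_iff.mp (Nat.le_zero.mp hlen)
    subst h; simp [pvInnerA, pvChunksB, pvJoinSlash]
  | succ n ih =>
    intro ps hlen hz c
    cases ps with
    | nil => simp [pvInnerA, pvChunksB, pvJoinSlash]
    | cons q rest =>
      obtain ⟨a, c1⟩ := q
      have hc1 : c1 ≠ 0 := hz (a, c1) List.mem_cons_self
      have hsplit : rest.takeWhile (fun q => q.2 == c1) ++ rest.dropWhile (fun q => q.2 == c1)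
          = rest := List.takeWhile_append_dropWhile
      have htwall : ∀ q ∈ rest.takeWhile (fun q => q.2 == c1), q.2 = c1 := by
        intro q hq
        have := List.mem_takeWhile_imp hq
        simpa using this
      have hstep : pvInnerA ((a, c1) :: rest) c [] =
          (if c1 = c then [] else ['/'])
            ++ ((pvChr a :: (rest.takeWhile (fun q => q.2 == c1)).map (fun q => pvChr q.1))
            ++ pvInnerA (rest.dropWhile (fun q => q.2 == c1)) c1 []) := by
        by_cases hcc : c1 = c
        · subst hcc
          simp only [pvInnerA, if_neg hc1, if_neg (by simp : ¬ c1 ≠ c1)]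
          rw [pvInnerA_acc rest c1 ([] ++ [pvChr a]), ← hsplit,
              pvInnerA_run _ _ c1 hc1 htwall]
          simp
        · simp only [pvInnerA, if_neg hc1, if_pos (by exact hcc : c1 ≠ c), if_neg hcc]
          rw [pvInnerA_acc rest c1 ([] ++ ['/', pvChr a]), ← hsplit,
              pvInnerA_run _ _ c1 hc1 htwall]
          simp
      rw [hstep]
      have hlen' : (rest.dropWhile (fun q => q.2 == c1)).length ≤ n := by
        have h1 := List.length_dropWhile_le (fun q => q.2 == c1) rest
        simp at hlen; omega
      have hz' : ∀ q ∈ rest.dropWhile (fun q => q.2 == c1), q.2 ≠ 0 := by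
        intro q hq
        refine hz q (List.mem_cons_of_mem _ ?_)
        rw [← hsplit]
        exact List.mem_append_right _ hq
      rw [ih _ hlen' hz' c1]
      simp only [pvChunksB, pvJoinSlash_cons, List.map_cons]
      cases hre : rest.dropWhile (fun q => q.2 == c1) with
      | nil => simp [pvChunksB, pvJoinSlash]
      | cons r l =>
        have hpr : (r.2 == c1) = false := by
          have := List.head?_dropWhile_not (fun q => q.2 == c1) rest
          rw [hre] at this
          simpa using this
        have hne : ¬ r.2 = c1 := by simpa using hpr
        have hchne : pvChunksB (r :: l) ≠ [] := by
          simp [pvChunksB_nil_iff]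
        simp only [hne, if_false, hchne]
        simp

theorem pvRow (s ce : List Int) (hce : ce ≠ []) :
    pvInnerA (List.zip s ce) (ce.head?.getD 0) []
      = pvJoinSlash (pvChunksB (pvPrefixB (List.zip s ce))) := by
  cases s with
  | nil => simp [pvInnerA, pvPrefixB, pvChunksB, pvJoinSlash]
  | cons a s' =>
    cases ce with
    | nil => exact absurd rfl hce
    | cons c0 ce' =>
      simp only [List.zip_cons_cons, Option.getD_some, List.head?_cons]
      rw [pvInnerA_trunc]
      by_cases h0 : c0 = 0
      · simp [pvPrefixB, h0, pvInnerA, pvChunksB, pvJoinSlash]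
      · have hpre : pvPrefixB ((a, c0) :: List.zip s' ce')
            = (a, c0) :: pvPrefixB (List.zip s' ce') := by
          simp [pvPrefixB, h0]
        rw [hpre]
        rw [pvMain ((a, c0) :: pvPrefixB (List.zip s' ce')).length _ le_rfl
            (by rw [← hpre]; exact pvPrefixB_nonzero _) c0]
        simp

-- ===== VERDICT (by name: the statement is the Claim_ definition above) =====
theorem S_to_seqs_spec : Claim_equal_S_to_seqs := by
  intro S CE hdom hpre
  unfold Spec_S_to_seqs S_to_seqs S_to_seqs_alt
  rw [PySem.List.foldl_append_singleton_eq_map, PySem.List.foldl_append_singleton_eq_map]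
  simp only [List.nil_append]
  apply List.map_congr_left
  intro p hp
  exact congrArg String.ofList (pvRow p.1 p.2 (hpre p hp).1)
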